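-- pv_equiv track=rewrite | github.com/ptsteadman/notebook | programs/py/keyword-highlight.py | highlight_overlapping_no_regex
-- ===== SOURCE A (Python) =====
-- from typing import List
--
-- def highlight_overlapping_no_regex(keywords: List[str], text: str) -> str:
--     """
--     Highlight overlapping keywords without using regexes.
--     Uses pure string operations for better performance and simplicity.
--     """
--     if not text:
--         return ""
--
--     # Filter out empty keywords
--     valid_keywords = [kw for kw in keywords if kw]
--     if not valid_keywords:
--         return text
--
--     # Find all matches using str.find()
--     matches = []
--     for keyword in valid_keywords:
--         start = 0
--         while True:
--             pos = text.find(keyword, start)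
--             if pos == -1:
--                 break
--             matches.append((pos, pos + len(keyword), keyword))
--             start = pos + 1
--
--     if not matches:
--         return text
--
--     # Sort matches by position
--     matches.sort(key=lambda x: x[0])
--
--     # Merge overlapping spans
--     merged = [matches[0]]
--     for start, end, keyword in matches[1:]:
--         if start <= merged[-1][1]:
--             # Overlap detected, extend the span
--             merged[-1] = (merged[-1][0], max(merged[-1][1], end), merged[-1][2])
--         else:
--             merged.append((start, end, keyword))
--
--     # Build result
--     result = []
--     last_end = 0
--     for start, end, keyword in merged:
--         result.append(text[last_end:start])
--         result.append(f"<b>{text[start:end]}</b>")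
--         last_end = end
--     result.append(text[last_end:])
--
--     return "".join(result)
-- ===== SOURCE B (Python) =====
-- def highlight_overlapping_no_regex(keywords, text):
--     """
--     Alternative implementation: mark a per-character coverage array with every
--     keyword occurrence, then emit maximal covered runs wrapped in <b></b>.
--     """
--     n = len(text)
--     cover = [False] * n
--     for kw in keywords:
--         if kw:
--             L = len(kw)
--             for i in range(n - L + 1):
--                 if text.startswith(kw, i):
--                     for j in range(i, i + L):
--                         cover[j] = True
--     parts = []
--     i = 0
--     while i < n:
--         if cover[i]:
--             j = i
--             while j < n and cover[j]:
--                 j += 1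
--             parts.append("<b>" + text[i:j] + "</b>")
--             i = j
--         else:
--             parts.append(text[i])
--             i += 1
--     return "".join(parts)
-- ===== Notes on version B (the rewrite author's own statement) =====
-- stated objective: alternative
-- what changed: B replaces A's per-keyword find-loop + sort + interval merging with a per-character boolean coverage array (every keyword occurrence marks its span) followed by a single sweep that emits maximal covered runs wrapped in <b></b>.
import Mathlib
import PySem

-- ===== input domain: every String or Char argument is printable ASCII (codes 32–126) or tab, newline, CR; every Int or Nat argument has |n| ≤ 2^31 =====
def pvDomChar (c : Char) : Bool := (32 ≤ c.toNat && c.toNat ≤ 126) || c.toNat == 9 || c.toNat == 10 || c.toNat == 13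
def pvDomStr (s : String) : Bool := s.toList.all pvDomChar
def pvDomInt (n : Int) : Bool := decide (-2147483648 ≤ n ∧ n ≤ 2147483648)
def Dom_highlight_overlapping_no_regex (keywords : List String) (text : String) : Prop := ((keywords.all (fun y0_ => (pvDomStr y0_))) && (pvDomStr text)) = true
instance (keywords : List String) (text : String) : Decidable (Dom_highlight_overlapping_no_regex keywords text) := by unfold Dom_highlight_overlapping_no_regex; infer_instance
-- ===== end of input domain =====

-- B replaces A's find-loop/sort/interval-merge pipeline with a per-character coverage
-- array and a single sweep emitting maximal covered runs (alternative algorithm, same results).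

-- ===== PORT A =====
-- A is ported on text.toList with PySem.Chars primitives (exact on the stated domain).

-- loop bounds for A's `while True: pos = text.find(keyword, start)` loop (cited by decreasing_by)
theorem pvFindFromA_gt (cs kw : List Char) (start : Nat) (h : cs.length < start) :
    PySem.Chars.findFrom cs kw (start : Int) none = -1 := by
  have h0 : ¬ ((start : Int) < 0) := by omega
  simp only [PySem.Chars.findFrom, if_neg h0]
  rw [if_pos (by exact_mod_cast h)]

theorem pvFindFromA_bounds (cs kw : List Char) (start : Nat)
    (h : PySem.Chars.findFrom cs kw (start : Int) none ≠ -1) :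
    start ≤ (PySem.Chars.findFrom cs kw (start : Int) none).toNat ∧
      (PySem.Chars.findFrom cs kw (start : Int) none).toNat ≤ cs.length := by
  rcases Nat.lt_or_ge cs.length start with hlt | hle
  · exact absurd (pvFindFromA_gt cs kw start hlt) h
  · have hs := PySem.Chars.findFrom_natCast_spec cs kw start hle h
    have he := PySem.Chars.findFrom_natCast cs kw start hle
    have hfl := PySem.Chars.find_le_length (cs.drop start) kw
    rw [he] at hs ⊢
    split at hs
    · simp_all
    · constructor <;> [skip; simp at hfl ⊢] <;> omega

-- the `while True` find loop of A: collects (pos, pos+len(kw), kw) and restarts at pos+1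
def pvFindAllA (cs kw : List Char) (start : Nat) : List (Int × Int × List Char) :=
  let pos := PySem.Chars.findFrom cs kw (start : Int) none
  if h : pos = -1 then []
  else (pos, pos + kw.length, kw) :: pvFindAllA cs kw (pos.toNat + 1)
termination_by cs.length + 1 - start
decreasing_by
  have := pvFindFromA_bounds cs kw start h
  omega

-- python: `if start <= merged[-1][1]: merged[-1] = (…, max(…), …) else: merged.append(…)`
def pvMergeStepA (mg : List (Int × Int × List Char)) (m : Int × Int × List Char) :
    List (Int × Int × List Char) :=
  match mg.getLast? with
  | none => [m]
  | some last =>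
      if m.1 ≤ last.2.1 then
        mg.dropLast ++ [(last.1, max last.2.1 m.2.1, last.2.2)]
      else mg ++ [m]

-- python: `result.append(text[last_end:start]); result.append(f"<b>{text[start:end]}</b>")`
def pvEmitStepA (cs : List Char) (st : List (List Char) × Int) (m : Int × Int × List Char) :
    List (List Char) × Int :=
  (st.1 ++ [PySem.Chars.slice cs (some st.2) (some m.1),
            ('<'::'b'::'>'::[]) ++ PySem.Chars.slice cs (some m.1) (some m.2.1) ++ ('<'::'/'::'b'::'>'::[])],
   m.2.1)

def highlight_overlapping_no_regex (keywords : List String) (text : String) : String :=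
  let cs := text.toList
  if cs.isEmpty then "" else
  let valid := (keywords.map String.toList).filter (fun kw => !kw.isEmpty)
  if valid.isEmpty then text else
  let ms := valid.foldl (fun acc kw => acc ++ pvFindAllA cs kw 0) []
  if ms.isEmpty then text else
  let sm := PySem.List.sorted ms (fun m => m.1) false
  let merged := sm.tail.foldl pvMergeStepA [sm.head!]
  let res := merged.foldl (pvEmitStepA cs) ([], 0)
  String.ofList (PySem.Chars.join [] (res.1 ++ [PySem.Chars.slice cs (some res.2) none]))

-- ===== PORT B =====
-- B: per-character coverage array, then emit maximal covered runs.

-- python: `for j in range(i, i+L): cover[j] = True` (j is a valid nonneg index here, so .toNat is exact)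
def pvMarkB (cover : List Bool) (i L : Int) : List Bool :=
  (PySem.List.pyRange i (i + L)).foldl (fun c j => c.set j.toNat true) cover

-- the marking phase of B; `text.startswith(kw, i)` with 0 <= i is exactly `startswith (drop i) kw`
def pvCoverB (cs : List Char) (kws : List (List Char)) : List Bool :=
  kws.foldl (fun cover kw =>
    if kw.isEmpty then cover else
    (PySem.List.pyRange 0 ((cs.length : Int) - kw.length + 1)).foldl
      (fun c i => if PySem.Chars.startswith (cs.drop i.toNat) kw then pvMarkB c i kw.length else c)
      cover) (List.replicate cs.length false)

-- inner `while j < n and cover[j]: j += 1`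
def pvScanEndB (n : Nat) (cover : List Bool) (j : Nat) : Nat :=
  if j < n && cover.getD j false then pvScanEndB n cover (j + 1) else j
termination_by n - j
decreasing_by simp_all; omega

theorem pvScanEndB_lt (n : Nat) (cover : List Bool) (j : Nat)
    (h : j < n && cover.getD j false) : j < pvScanEndB n cover j := by
  have hle : ∀ k, k ≤ pvScanEndB n cover k := by
    intro k
    fun_induction pvScanEndB n cover k with
    | case1 _ _ ih => omega
    | case2 => omega
  rw [pvScanEndB, if_pos h]
  have := hle (j + 1)
  omega

-- outer `while i < n` emit loop of B; `text[i:j]` = (drop i).take (j-i), `text[i]` = getD (both in range)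
def pvRenderB (cs : List Char) (cover : List Bool) (i : Nat) : List (List Char) :=
  if h : i < cs.length then
    if hc : cover.getD i false then
      let j := pvScanEndB cs.length cover i
      (('<'::'b'::'>'::[]) ++ (cs.drop i).take (j - i) ++ ('<'::'/'::'b'::'>'::[])) ::
        pvRenderB cs cover j
    else
      [cs.getD i ' '] :: pvRenderB cs cover (i + 1)
  else []
termination_by cs.length - i
decreasing_by
  · have := pvScanEndB_lt cs.length cover i (by simp only [List.getD] at hc; simp [h, hc])
    omega
  · omega

def highlight_overlapping_no_regex_alt (keywords : List String) (text : String) : String :=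
  let cs := text.toList
  let cover := pvCoverB cs (keywords.map String.toList)
  String.ofList (PySem.Chars.join [] (pvRenderB cs cover 0))

-- ===== PRECONDITION & SPEC =====
def Spec_highlight_overlapping_no_regex (keywords : List String) (text : String) (out : String) : Prop := out = highlight_overlapping_no_regex_alt keywords text
instance (keywords : List String) (text : String) (out : String) : Decidable (Spec_highlight_overlapping_no_regex keywords text out) := by unfold Spec_highlight_overlapping_no_regex; infer_instance

-- ===== CLAIM (what is proved, stated in full; the proofs are below) =====
def Claim_equal_highlight_overlapping_no_regex : Prop := ∀ (keywords : List String) (text : String), Dom_highlight_overlapping_no_regex keywords text → Spec_highlight_overlapping_no_regex keywords text (highlight_overlapping_no_regex keywords text)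

-- ===== LEMMAS AND PROOFS =====

-- abbreviation for A's interval triples
-- coverage predicate: position p of cs is inside some occurrence of some nonempty keyword
def pvCov (cs : List Char) (kws : List (List Char)) (p : Nat) : Prop :=
  ∃ kw ∈ kws, kw ≠ [] ∧ ∃ s : Nat, s ≤ p ∧ p < s + kw.length ∧ kw <+: cs.drop s

-- canonical rendering of a gap-separated run list
def pvEmitRuns (cs : List Char) : Nat → List (Nat × Nat) → List Char
  | i, [] => cs.drop i
  | i, (s, e) :: r =>
      (cs.drop i).take (s - i) ++ ('<'::'b'::'>'::[]) ++ (cs.drop s).take (e - s) ++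
        ('<'::'/'::'b'::'>'::[]) ++ pvEmitRuns cs e r

-- ---- A side ----

theorem pv_join_flatten (xs : List (List Char)) : PySem.Chars.join [] xs = xs.flatten := by
  show List.intercalate [] xs = xs.flatten
  simp only [List.intercalate]
  induction xs with
  | nil => rfl
  | cons a t ih => cases t <;> simp_all [List.intersperse]


theorem pv_findFrom_ne_neg_one (cs kw : List Char) (hkw : kw ≠ []) (start i : Nat)
    (hi : start ≤ i) (hp : kw <+: cs.drop i) :
    PySem.Chars.findFrom cs kw (start : Int) none ≠ -1 := by
  have hlen : start ≤ cs.length := by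
    by_contra hgt
    push Not at hgt
    have hd : cs.drop i = [] := List.drop_eq_nil_of_le (by omega)
    rw [hd] at hp
    exact hkw (List.prefix_nil.mp hp)
  rw [Ne, PySem.Chars.findFrom_natCast_eq_neg_one_iff cs kw start hlen]
  intro hni
  apply hni
  have h2 : kw <+: (cs.drop start).drop (i - start) := by
    rw [List.drop_drop, Nat.add_sub_cancel' hi]
    exact hp
  exact (PySem.Chars.isIn_iff_infix kw (cs.drop start)).mp
    ((PySem.Chars.exists_prefix_drop_iff_isIn kw (cs.drop start)).mp ⟨_, h2⟩)

theorem pv_mem_findAllA (cs kw : List Char) (hkw : kw ≠ []) (start : Nat)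
    (m : Int × Int × List Char) :
    m ∈ pvFindAllA cs kw start ↔
      ∃ i : Nat, start ≤ i ∧ kw <+: cs.drop i ∧ m = ((i : Int), (i : Int) + kw.length, kw) := by
  fun_induction pvFindAllA cs kw start with
  | case1 start pos h =>
    constructor
    · intro hm
      simp at hm
    · rintro ⟨i, hi, hp, rfl⟩
      exact absurd h (pv_findFrom_ne_neg_one cs kw hkw start i hi hp)
  | case2 start pos h ih =>
    have hb := pvFindFromA_bounds cs kw start h
    have hlen : start ≤ cs.length := by omega
    have hs := PySem.Chars.findFrom_natCast_spec cs kw start hlen h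
    have hpos0 : (0 : Int) ≤ pos := le_trans (by positivity) hs.1
    have hcast : ((pos.toNat : Nat) : Int) = pos := Int.toNat_of_nonneg hpos0
    constructor
    · intro hm
      rcases List.mem_cons.mp hm with rfl | hm
      · exact ⟨pos.toNat, hb.1, hs.2.1, by rw [hcast]⟩
      · obtain ⟨i, hi, hp, rfl⟩ := ih.mp hm
        exact ⟨i, by omega, hp, rfl⟩
    · rintro ⟨i, hi, hp, rfl⟩
      rcases Nat.lt_trichotomy i pos.toNat with hlt | heq | hgt
      · exact absurd hp (hs.2.2 i hi hlt)
      · subst heq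
        exact List.mem_cons.mpr (Or.inl (by rw [hcast]))
      · exact List.mem_cons.mpr (Or.inr (ih.mpr ⟨i, by omega, hp, rfl⟩))

def pvMergeList (S : List (Int × Int × List Char)) : List (Int × Int × List Char) :=
  match S with
  | [] => []
  | h :: t => t.foldl pvMergeStepA [h]

def pvInv (S M : List (Int × Int × List Char)) : Prop :=
  M ≠ [] ∧ M.Pairwise (fun a b => a.2.1 < b.1) ∧ (∀ x ∈ M, x.1 < x.2.1) ∧
  (∀ x ∈ M, ∃ y ∈ S, x.1 = y.1) ∧
  (∀ p : Int, (∃ x ∈ M, x.1 ≤ p ∧ p < x.2.1) ↔ ∃ y ∈ S, y.1 ≤ p ∧ p < y.2.1)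

theorem pvMergeList_snoc (l : List (Int × Int × List Char)) (m : Int × Int × List Char)
    (h : l ≠ []) : pvMergeList (l ++ [m]) = pvMergeStepA (pvMergeList l) m := by
  cases l with
  | nil => exact absurd rfl h
  | cons a t => simp [pvMergeList, List.foldl_append]

theorem pvMergeInv (S : List (Int × Int × List Char)) (hne : S ≠ [])
    (hsort : S.Pairwise (fun a b => a.1 ≤ b.1)) (hlt : ∀ y ∈ S, y.1 < y.2.1) :
    pvInv S (pvMergeList S) := by
  induction S using List.reverseRecOn with
  | nil => exact absurd rfl hne
  | append_singleton l m ih =>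
    rcases eq_or_ne l [] with rfl | hl
    · refine ⟨by simp [pvMergeList], by simp [pvMergeList], ?_, ?_, ?_⟩
      · simpa [pvMergeList] using hlt m (by simp)
      · intro x hx
        exact ⟨x, by simpa [pvMergeList] using hx, rfl⟩
      · intro p
        simp [pvMergeList]
    · have hparts := List.pairwise_append.mp hsort
      have hsl : l.Pairwise (fun a b => a.1 ≤ b.1) := hparts.1
      have hlm : ∀ a ∈ l, a.1 ≤ m.1 := fun a ha => hparts.2.2 a ha m (by simp)
      have hltl : ∀ y ∈ l, y.1 < y.2.1 := fun y hy => hlt y (List.mem_append_left _ hy)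
      obtain ⟨hMne, hMpair, hMlt, hMf, hMcov⟩ := ih hl hsl hltl
      rw [pvMergeList_snoc l m hl]
      obtain ⟨M', c, hM⟩ : ∃ M' c, pvMergeList l = M' ++ [c] :=
        ⟨(pvMergeList l).dropLast, (pvMergeList l).getLast hMne,
          (List.dropLast_append_getLast hMne).symm⟩
      rw [hM] at hMpair hMlt hMf hMcov
      have hMparts := List.pairwise_append.mp hMpair
      obtain ⟨y, hy, hcy⟩ := hMf c (by simp)
      have hcm : c.1 ≤ m.1 := hcy ▸ hlm y hy
      have hce : c.1 < c.2.1 := hMlt c (by simp)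
      have hme : m.1 < m.2.1 := hlt m (by simp)
      simp only [pvMergeStepA, hM, List.getLast?_concat, List.dropLast_concat]
      split_ifs with hcase
      · -- overlap: extend the last interval
        refine ⟨by simp, ?_, ?_, ?_, ?_⟩
        · exact List.pairwise_append.mpr ⟨hMparts.1, by simp, by
            intro a ha b hb
            simp at hb
            subst hb
            exact hMparts.2.2 a ha c (by simp)⟩
        · intro x hx
          rcases List.mem_append.mp hx with hx | hx
          · exact hMlt x (List.mem_append_left _ hx)
          · simp at hx
            subst hx
            simp only []
            exact lt_of_lt_of_le hce (le_max_left _ _)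
        · intro x hx
          rcases List.mem_append.mp hx with hx | hx
          · obtain ⟨z, hz, hez⟩ := hMf x (List.mem_append_left _ hx)
            exact ⟨z, List.mem_append_left _ hz, hez⟩
          · simp at hx
            subst hx
            exact ⟨y, List.mem_append_left _ hy, hcy⟩
        · intro p
          constructor
          · rintro ⟨x, hx, hx1, hx2⟩
            rcases List.mem_append.mp hx with hx | hx
            · obtain ⟨z, hz, hz1, hz2⟩ := (hMcov p).mp ⟨x, List.mem_append_left _ hx, hx1, hx2⟩
              exact ⟨z, List.mem_append_left _ hz, hz1, hz2⟩
            · simp at hx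
              subst hx
              simp only [] at hx1 hx2
              rcases lt_or_ge p c.2.1 with hpc | hpc
              · obtain ⟨z, hz, hz1, hz2⟩ := (hMcov p).mp ⟨c, by simp, hx1, hpc⟩
                exact ⟨z, List.mem_append_left _ hz, hz1, hz2⟩
              · refine ⟨m, by simp, le_trans hcase hpc, ?_⟩
                omega
          · rintro ⟨z, hz, hz1, hz2⟩
            rcases List.mem_append.mp hz with hz | hz
            · obtain ⟨x, hx, hx1, hx2⟩ := (hMcov p).mpr ⟨z, hz, hz1, hz2⟩
              rcases List.mem_append.mp hx with hx | hx
              · exact ⟨x, List.mem_append_left _ hx, hx1, hx2⟩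
              · simp at hx
                rw [hx] at hx1 hx2
                exact ⟨(c.1, max c.2.1 m.2.1, c.2.2), by simp, hx1, by
                  exact lt_of_lt_of_le hx2 (le_max_left _ _)⟩
            · simp at hz
              rw [hz] at hz1 hz2
              exact ⟨(c.1, max c.2.1 m.2.1, c.2.2), by simp, le_trans hcm hz1, by
                exact lt_of_lt_of_le hz2 (le_max_right _ _)⟩
      · -- gap: append a new interval
        push Not at hcase
        refine ⟨by simp, ?_, ?_, ?_, ?_⟩
        · refine List.pairwise_append.mpr ⟨hMpair, by simp, ?_⟩
          intro a ha b hb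
          simp at hb
          rw [hb]
          rcases List.mem_append.mp ha with ha | ha
          · calc a.2.1 < c.1 := hMparts.2.2 a ha c (by simp)
              _ < c.2.1 := hce
              _ < m.1 := hcase
          · simp at ha
            rw [ha]
            exact hcase
        · intro x hx
          rcases List.mem_append.mp hx with hx | hx
          · exact hMlt x hx
          · simp at hx
            rw [hx]
            exact hme
        · intro x hx
          rcases List.mem_append.mp hx with hx | hx
          · obtain ⟨z, hz, hez⟩ := hMf x hx
            exact ⟨z, List.mem_append_left _ hz, hez⟩
          · simp at hx
            rw [hx]
            exact ⟨m, by simp, rfl⟩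
        · intro p
          constructor
          · rintro ⟨x, hx, hx1, hx2⟩
            rcases List.mem_append.mp hx with hx | hx
            · obtain ⟨z, hz, hz1, hz2⟩ := (hMcov p).mp ⟨x, hx, hx1, hx2⟩
              exact ⟨z, List.mem_append_left _ hz, hz1, hz2⟩
            · simp at hx
              rw [hx] at hx1 hx2
              exact ⟨m, by simp, hx1, hx2⟩
          · rintro ⟨z, hz, hz1, hz2⟩
            rcases List.mem_append.mp hz with hz | hz
            · obtain ⟨x, hx, hx1, hx2⟩ := (hMcov p).mpr ⟨z, hz, hz1, hz2⟩
              exact ⟨x, List.mem_append_left _ hx, hx1, hx2⟩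
            · simp at hz
              rw [hz] at hz1 hz2
              exact ⟨m, by simp, hz1, hz2⟩

-- A's emit fold produces the canonical rendering of the merged run list
theorem pvEmitA (cs : List Char) (M : List (Int × Int × List Char)) :
    ∀ (acc : List (List Char)) (le : Int), 0 ≤ le →
    M.Pairwise (fun a b => a.2.1 < b.1) → (∀ x ∈ M, le ≤ x.1 ∧ x.1 < x.2.1) →
    PySem.Chars.join [] ((M.foldl (pvEmitStepA cs) (acc, le)).1 ++
        [PySem.Chars.slice cs (some (M.foldl (pvEmitStepA cs) (acc, le)).2) none]) =
      PySem.Chars.join [] acc ++ pvEmitRuns cs le.toNat (M.map fun x => (x.1.toNat, x.2.1.toNat)) := by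
  induction M with
  | nil =>
    intro acc le hle _ _
    simp only [List.foldl_nil, pv_join_flatten, List.flatten_append]
    simp [PySem.Chars.slice_eq_listSlice, PySem.List.slice_from cs hle, pvEmitRuns]
  | cons x r ih =>
    intro acc le hle hpair hbd
    have hx := hbd x (by simp)
    have hx1 : (0:Int) ≤ x.1 := le_trans hle hx.1
    have hx2 : (0:Int) ≤ x.2.1 := le_of_lt (lt_of_le_of_lt hx1 hx.2)
    have hpr := List.pairwise_cons.mp hpair
    simp only [List.foldl_cons, List.map_cons]
    rw [show pvEmitStepA cs (acc, le) x =
      (acc ++ [PySem.Chars.slice cs (some le) (some x.1),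
        ('<'::'b'::'>'::[]) ++ PySem.Chars.slice cs (some x.1) (some x.2.1) ++ ('<'::'/'::'b'::'>'::[])], x.2.1) from rfl]
    rw [ih _ x.2.1 hx2 hpr.2 (fun z hz => ⟨le_of_lt (hpr.1 z hz), (hbd z (by simp [hz])).2⟩)]
    simp only [pvEmitRuns, pv_join_flatten, List.flatten_append, List.flatten_cons]
    simp [PySem.Chars.slice_eq_listSlice, PySem.List.slice_toNat cs hle hx1,
      PySem.List.slice_toNat cs hx1 hx2]

-- ---- B side ----

theorem pv_pyRange_shift (i : Int) (L : Nat) :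
    PySem.List.pyRange i (i + (L : Int)) = (List.range L).map (fun k : Nat => i + (k : Int)) := by
  rw [PySem.List.pyRange_of_pos i (i + L) Int.one_pos]
  have h1 : ((i + (L:Int) - i + 1 - 1) / 1).toNat = L := by omega
  rcases Nat.eq_zero_or_pos L with rfl | hL
  · rw [if_neg (by omega)]
    simp
  · rw [if_pos (by omega), h1]
    exact List.map_congr_left (fun k _ => by ring)

theorem pv_length_foldset (l : List Int) (cv : List Bool) :
    (l.foldl (fun c j => c.set j.toNat true) cv).length = cv.length := by
  induction l generalizing cv with
  | nil => rfl
  | cons a t ih => simp [ih, List.length_set]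

theorem pv_length_markB (cv : List Bool) (i L : Int) : (pvMarkB cv i L).length = cv.length :=
  pv_length_foldset _ cv

theorem pv_getElem?_markB (cv : List Bool) (i : Int) (hi : 0 ≤ i) (L : Nat) (p : Nat) :
    (pvMarkB cv i (L : Int))[p]? =
      if i.toNat ≤ p ∧ p < i.toNat + L ∧ p < cv.length then some true else cv[p]? := by
  unfold pvMarkB
  rw [pv_pyRange_shift i L, List.foldl_map]
  induction L generalizing i cv with
  | zero =>
    rw [List.range_zero]
    simp only [List.foldl_nil]
    rw [if_neg (by omega)]
  | succ L ih =>
    rw [List.range_succ_eq_map]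
    simp only [List.foldl_cons, List.foldl_map]
    have e1 : ((List.range L).foldl
        (fun (c : List Bool) (k : Nat) => c.set (i + ((Nat.succ k : Nat) : Int)).toNat true)
        (cv.set (i + ((0:Nat):Int)).toNat true))
      = ((List.range L).foldl
        (fun (c : List Bool) (k : Nat) => c.set ((i+1) + (k : Nat)).toNat true)
        (cv.set (i + ((0:Nat):Int)).toNat true)) := by
      congr 1
      funext c k
      congr 1
      omega
    rw [e1, ih (cv.set (i + ((0:Nat):Int)).toNat true) (i+1) (by omega)]
    rw [List.length_set, List.getElem?_set]
    have hii : (i + ((0:Nat):Int)).toNat = i.toNat := by omega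
    rw [hii]
    by_cases h1 : (i+1).toNat ≤ p ∧ p < (i+1).toNat + L ∧ p < cv.length
    · rw [if_pos h1, if_pos (by omega)]
    · rw [if_neg h1]
      by_cases h2 : i.toNat = p
      · subst h2
        by_cases h3 : i.toNat < cv.length
        · rw [if_pos rfl, if_pos h3, if_pos (by omega)]
        · rw [if_pos rfl, if_neg h3, if_neg (by omega)]
          exact (List.getElem?_eq_none (by omega)).symm
      · rw [if_neg h2]
        by_cases h4 : i.toNat ≤ p ∧ p < i.toNat + (L+1) ∧ p < cv.length
        · exfalso
          omega
        · rw [if_neg h4]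

def pvHitB (cs kw : List Char) (p : Nat) : Bool :=
  (List.range (p+1)).any (fun s => decide (p < s + kw.length) && PySem.Chars.startswith (cs.drop s) kw)

theorem pv_pyRange_zero (b : Int) :
    PySem.List.pyRange 0 b = (List.range b.toNat).map (fun k : Nat => (k : Int)) := by
  rw [PySem.List.pyRange_of_pos 0 b Int.one_pos]
  have h : (if (0:Int) < b then ((b - 0 + 1 - 1)/1).toNat else 0) = b.toNat := by
    split <;> omega
  rw [h]
  exact List.map_congr_left (fun k _ => by ring)

theorem pv_length_inner (cs kw : List Char) (l : List Int) (cv : List Bool) :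
    (l.foldl (fun c i => if PySem.Chars.startswith (cs.drop i.toNat) kw then pvMarkB c i kw.length else c) cv).length
      = cv.length := by
  induction l generalizing cv with
  | nil => rfl
  | cons a t ih =>
    simp only [List.foldl_cons]
    rw [ih]
    split <;> simp [pv_length_markB]

theorem pv_inner_getElem? (cs kw : List Char) (l : List Nat) (cv : List Bool) (p : Nat)
    (hp : p < cv.length) :
    ((l.map (fun s : Nat => (s : Int))).foldl
        (fun c i => if PySem.Chars.startswith (cs.drop i.toNat) kw then pvMarkB c i kw.length else c) cv)[p]? =
      if l.any (fun s => decide (s ≤ p) && decide (p < s + kw.length) && PySem.Chars.startswith (cs.drop s) kw)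
      then some true else cv[p]? := by
  induction l generalizing cv with
  | nil => simp
  | cons s t ih =>
    simp only [List.map_cons, List.foldl_cons, List.any_cons, Int.toNat_natCast]
    by_cases hs : PySem.Chars.startswith (cs.drop s) kw
    · rw [if_pos hs, ih _ (by rw [pv_length_markB]; exact hp)]
      have hm := pv_getElem?_markB cv (s : Int) (by positivity) kw.length p
      rw [Int.toNat_natCast] at hm
      rw [hm]
      by_cases ht : t.any (fun s => decide (s ≤ p) && decide (p < s + kw.length) && PySem.Chars.startswith (cs.drop s) kw)
      · rw [if_pos ht]
        rw [if_pos (by simp [ht])]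
      · rw [if_neg ht]
        by_cases hc : s ≤ p ∧ p < s + kw.length
        · rw [if_pos (by omega), if_pos (by simp [hs, ht, hc.1, hc.2])]
        · rw [if_neg (by omega), if_neg (by simp [ht]; omega)]
    · rw [if_neg hs, ih cv hp]
      have hz : (decide (s ≤ p) && decide (p < s + kw.length) && PySem.Chars.startswith (cs.drop s) kw) = false := by
        simp [hs]
      simp only [hz, Bool.false_or]

theorem pv_any_pos (cs kw : List Char) (hkw : kw ≠ []) (p : Nat) :
    ((List.range ((cs.length : Int) - kw.length + 1).toNat).any
        (fun s => decide (s ≤ p) && decide (p < s + kw.length) && PySem.Chars.startswith (cs.drop s) kw))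
      = pvHitB cs kw p := by
  rw [Bool.eq_iff_iff]
  simp only [List.any_eq_true, List.mem_range, pvHitB, Bool.and_eq_true, decide_eq_true_eq,
    PySem.Chars.startswith_iff]
  constructor
  · rintro ⟨s, hr, ⟨h1, h2⟩, h3⟩
    exact ⟨s, by omega, h2, h3⟩
  · rintro ⟨s, hr, h2, h3⟩
    have hlen : kw.length ≤ (cs.drop s).length := h3.length_le
    rw [List.length_drop] at hlen
    have hsn : s ≤ cs.length := by
      by_contra hgt
      push Not at hgt
      rw [List.drop_eq_nil_of_le (by omega)] at h3
      exact hkw (List.prefix_nil.mp h3)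
    exact ⟨s, by omega, ⟨by omega, h2⟩, h3⟩

theorem pv_getElem?_coverB (cs : List Char) (kws : List (List Char)) (p : Nat)
    (hp : p < cs.length) :
    ((pvCoverB cs kws)[p]? = some true) ↔ pvCov cs kws p := by
  unfold pvCoverB
  have main : ∀ (l : List (List Char)) (cv : List Bool), p < cv.length →
      (l.foldl (fun cover kw =>
        if kw.isEmpty then cover else
        (PySem.List.pyRange 0 ((cs.length : Int) - kw.length + 1)).foldl
          (fun c i => if PySem.Chars.startswith (cs.drop i.toNat) kw then pvMarkB c i kw.length else c)
          cover) cv)[p]? =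
        if l.any (fun kw => !kw.isEmpty && pvHitB cs kw p) then some true else cv[p]? := by
    intro l
    induction l with
    | nil => intro cv _; simp
    | cons kw t ih =>
      intro cv hcv
      simp only [List.foldl_cons, List.any_cons]
      by_cases hkw : kw.isEmpty
      · rw [if_pos hkw, ih cv hcv]
        simp [hkw]
      · rw [if_neg hkw]
        have hkw' : kw ≠ [] := by simpa [List.isEmpty_iff] using hkw
        have hcast : ((cs.length : Int) - kw.length + 1) = (((cs.length : Int) - kw.length + 1).toNat : Int) ∨
            ((cs.length : Int) - kw.length + 1) ≤ 0 := by omega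
        have hinner := pv_inner_getElem? cs kw (List.range ((cs.length : Int) - kw.length + 1).toNat) cv p hcv
        rw [pv_pyRange_zero, ih _ (by rw [pv_length_inner]; exact hcv), hinner, pv_any_pos cs kw hkw' p]
        by_cases ht : t.any (fun kw => !kw.isEmpty && pvHitB cs kw p)
        · rw [if_pos ht, if_pos (by simp [ht])]
        · rw [if_neg ht]
          by_cases hh : pvHitB cs kw p
          · rw [if_pos hh, if_pos (by simp [hh, hkw])]
          · rw [if_neg (by simpa using hh), if_neg (by simp [ht, hh])]
  rw [main kws (List.replicate cs.length false) (by simpa using hp)]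
  have hrep : (List.replicate cs.length false)[p]? = some false := by
    simp [hp]
  constructor
  · intro h
    split at h
    · rename_i hany
      simp only [List.any_eq_true, Bool.and_eq_true] at hany
      obtain ⟨kw, hkw, hne, hhit⟩ := hany
      simp only [pvHitB, List.any_eq_true, List.mem_range, Bool.and_eq_true, decide_eq_true_eq,
        PySem.Chars.startswith_iff] at hhit
      obtain ⟨s, hs, h2, h3⟩ := hhit
      exact ⟨kw, hkw, by simpa [List.isEmpty_iff] using hne, s, by omega, h2, h3⟩
    · rw [hrep] at h
      simp at h
  · rintro ⟨kw, hkw, hne, s, h1, h2, h3⟩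
    rw [if_pos]
    simp only [List.any_eq_true, Bool.and_eq_true]
    refine ⟨kw, hkw, by simpa [List.isEmpty_iff] using hne, ?_⟩
    simp only [pvHitB, List.any_eq_true, List.mem_range, Bool.and_eq_true, decide_eq_true_eq,
      PySem.Chars.startswith_iff]
    exact ⟨s, by omega, h2, h3⟩

theorem pvScanEndB_eq (n : Nat) (cover : List Bool) (e : Nat) (he : e ≤ n)
    (hstop : e = n ∨ cover.getD e false = false) :
    ∀ j, j ≤ e → (∀ q, j ≤ q → q < e → cover.getD q false = true) →
    pvScanEndB n cover j = e := by
  have H : ∀ d j, j ≤ e → e - j ≤ d → (∀ q, j ≤ q → q < e → cover.getD q false = true) →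
      pvScanEndB n cover j = e := by
    intro d
    induction d with
    | zero =>
      intro j hj hd _
      have hje : j = e := by omega
      subst hje
      rw [pvScanEndB]
      rcases hstop with hn | hf
      · rw [if_neg (by simp; omega)]
      · rw [if_neg (by simp only [List.getD] at hf; simp [hf])]
    | succ d ih =>
      intro j hj hd hc
      by_cases hje : j = e
      · subst hje
        rw [pvScanEndB]
        rcases hstop with hn | hf
        · rw [if_neg (by simp; omega)]
        · rw [if_neg (by simp only [List.getD] at hf; simp [hf])]
      · rw [pvScanEndB, if_pos (by have hq := hc j le_rfl (by omega); simp only [List.getD] at hq; simp [hq]; omega)]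
        exact ih (j+1) (by omega) (by omega) (fun q h1 h2 => hc q (by omega) h2)
  exact fun j hj => H (e - j) j hj le_rfl

theorem pvRenderB_eq (cs : List Char) (cover : List Bool) :
    ∀ (i : Nat) (M : List (Nat × Nat)),
    M.Pairwise (fun a b => a.2 < b.1) → (∀ x ∈ M, x.1 < x.2 ∧ x.2 ≤ cs.length) →
    (∀ x ∈ M, i ≤ x.1) →
    (∀ p, i ≤ p → p < cs.length → (cover.getD p false = true ↔ ∃ x ∈ M, x.1 ≤ p ∧ p < x.2)) →
    PySem.Chars.join [] (pvRenderB cs cover i) = pvEmitRuns cs i M := by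
  have H : ∀ (d i : Nat) (M : List (Nat × Nat)), cs.length - i ≤ d →
      M.Pairwise (fun a b => a.2 < b.1) → (∀ x ∈ M, x.1 < x.2 ∧ x.2 ≤ cs.length) →
      (∀ x ∈ M, i ≤ x.1) →
      (∀ p, i ≤ p → p < cs.length → (cover.getD p false = true ↔ ∃ x ∈ M, x.1 ≤ p ∧ p < x.2)) →
      PySem.Chars.join [] (pvRenderB cs cover i) = pvEmitRuns cs i M := by
    intro d
    induction d with
    | zero =>
      intro i M hd hpair hbd hge hcov
      have hin : ¬ i < cs.length := by omega
      have hM : M = [] := by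
        cases M with
        | nil => rfl
        | cons x r =>
          exfalso
          have h1 := hbd x (by simp)
          have h2 := hge x (by simp)
          omega
      subst hM
      rw [pvRenderB, dif_neg hin]
      rw [pv_join_flatten]
      show ([] : List Char) = pvEmitRuns cs i []
      rw [pvEmitRuns, List.drop_eq_nil_of_le (by omega)]
    | succ d ih =>
      intro i M hd hpair hbd hge hcov
      by_cases hi : i < cs.length
      · rw [pvRenderB, dif_pos hi]
        by_cases hc : cover.getD i false = true
        · -- a highlighted run starts at i
          obtain ⟨x, hx, hx1, hx2⟩ := (hcov i le_rfl hi).mp hc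
          have hxi : x.1 = i := le_antisymm hx1 (hge x hx)
          cases M with
          | nil => simp at hx
          | cons h r =>
            have hxh : x = h := by
              rcases List.mem_cons.mp hx with rfl | hxr
              · rfl
              · exfalso
                have hp := (List.pairwise_cons.mp hpair).1 x hxr
                have hhb := hbd h (by simp)
                have hhg := hge h (by simp)
                omega
            rw [hxh] at hx1 hx2 hxi
            rw [dif_pos hc]
            have hscan : pvScanEndB cs.length cover i = h.2 := by
              refine pvScanEndB_eq cs.length cover h.2 (hbd h (by simp)).2 ?_ i (by omega) ?_
              · by_cases hen : h.2 = cs.length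
                · exact Or.inl hen
                · refine Or.inr ?_
                  by_cases hcb : cover.getD h.2 false = true
                  · exfalso
                    obtain ⟨y, hy, hy1, hy2⟩ :=
                      (hcov h.2 (by omega) (by have := (hbd h (by simp)).2; omega)).mp hcb
                    rcases List.mem_cons.mp hy with rfl | hyr
                    · omega
                    · have hp := (List.pairwise_cons.mp hpair).1 y hyr
                      omega
                  · simpa using hcb
              · intro q hq1 hq2
                exact (hcov q (by omega) (by have := (hbd h (by simp)).2; omega)).mpr
                  ⟨h, by simp, by omega, hq2⟩
            rw [hscan]
            rw [pv_join_flatten, List.flatten_cons, ← pv_join_flatten]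
            have hrec := ih h.2 r (by omega) (List.pairwise_cons.mp hpair).2
              (fun z hz => hbd z (by simp [hz]))
              (fun z hz => le_of_lt ((List.pairwise_cons.mp hpair).1 z hz))
              (fun p hp1 hp2 => by
                rw [hcov p (by omega) hp2]
                constructor
                · rintro ⟨y, hy, hy1, hy2⟩
                  rcases List.mem_cons.mp hy with rfl | hyr
                  · omega
                  · exact ⟨y, hyr, hy1, hy2⟩
                · rintro ⟨y, hy, hy1, hy2⟩
                  exact ⟨y, by simp [hy], hy1, hy2⟩)
            rw [hrec]
            show _ = pvEmitRuns cs i ((h.1, h.2) :: r)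
            rw [pvEmitRuns]
            rw [hxi, Nat.sub_self, List.take_zero]
            simp
        · -- plain character at i
          rw [dif_neg hc]
          have hge' : ∀ x ∈ M, i + 1 ≤ x.1 := by
            intro x hx
            have h1 := hge x hx
            have h2 := hbd x hx
            rcases Nat.eq_or_lt_of_le h1 with heq | hlt
            · exfalso
              exact hc ((hcov i le_rfl hi).mpr ⟨x, hx, by omega, by omega⟩)
            · omega
          rw [pv_join_flatten, List.flatten_cons, ← pv_join_flatten]
          rw [ih (i+1) M (by omega) hpair hbd hge'
            (fun p hp1 hp2 => hcov p (by omega) hp2)]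
          have hgd : cs.getD i ' ' = cs[i] := List.getD_eq_getElem cs ' ' hi
          cases M with
          | nil =>
            show [cs.getD i ' '] ++ pvEmitRuns cs (i+1) [] = pvEmitRuns cs i []
            rw [pvEmitRuns, pvEmitRuns, hgd]
            rw [List.drop_eq_getElem_cons hi]
            rfl
          | cons h r =>
            show [cs.getD i ' '] ++ pvEmitRuns cs (i+1) ((h.1, h.2) :: r) = pvEmitRuns cs i ((h.1, h.2) :: r)
            rw [pvEmitRuns, pvEmitRuns, hgd]
            have hh1 : i + 1 ≤ h.1 := hge' h (by simp)
            rw [List.drop_eq_getElem_cons hi]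
            have htk : (cs[i] :: cs.drop (i+1)).take (h.1 - i) =
                cs[i] :: (cs.drop (i+1)).take (h.1 - (i+1)) := by
              have : h.1 - i = (h.1 - (i+1)) + 1 := by omega
              rw [this, List.take_succ_cons]
            rw [htk]
            simp
      · -- i past the end: M empty
        have hM : M = [] := by
          cases M with
          | nil => rfl
          | cons x r =>
            exfalso
            have h1 := hbd x (by simp)
            have h2 := hge x (by simp)
            omega
        subst hM
        rw [pvRenderB, dif_neg hi]
        rw [pv_join_flatten]
        show ([] : List Char) = pvEmitRuns cs i []
        rw [pvEmitRuns, List.drop_eq_nil_of_le (by omega)]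

  exact fun i M => H (cs.length - i) i M le_rfl


-- ---- final assembly ----

theorem pv_getD_iff (l : List Bool) (p : Nat) : (l.getD p false = true) ↔ (l[p]? = some true) := by
  simp only [List.getD]
  cases h : l[p]? <;> simp

theorem pv_match_le (cs kw : List Char) (i : Nat) (hkw : kw ≠ []) (hp : kw <+: cs.drop i) :
    i + kw.length ≤ cs.length := by
  have hl := hp.length_le
  rw [List.length_drop] at hl
  have hi : i ≤ cs.length := by
    by_contra hgt
    push Not at hgt
    rw [List.drop_eq_nil_of_le (by omega)] at hp
    exact hkw (List.prefix_nil.mp hp)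
  have hk : 0 < kw.length := List.length_pos_iff.mpr hkw
  omega

theorem pv_mem_msA (cs : List Char) (kwsL : List (List Char)) (m : Int × Int × List Char) :
    m ∈ (kwsL.filter (fun kw => !kw.isEmpty)).foldl (fun acc kw => acc ++ pvFindAllA cs kw 0) [] ↔
      ∃ kw ∈ kwsL, kw ≠ [] ∧ ∃ i : Nat, kw <+: cs.drop i ∧
        m = ((i : Int), (i : Int) + kw.length, kw) := by
  rw [PySem.List.foldl_append_eq_flatMap, List.nil_append, List.mem_flatMap]
  constructor
  · rintro ⟨kw, hkwf, hm⟩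
    obtain ⟨hkl, hne⟩ := List.mem_filter.mp hkwf
    have hne' : kw ≠ [] := by simpa [List.isEmpty_iff] using hne
    obtain ⟨i, _, hp, hm⟩ := (pv_mem_findAllA cs kw hne' 0 m).mp hm
    exact ⟨kw, hkl, hne', i, hp, hm⟩
  · rintro ⟨kw, hkl, hne, i, hp, hm⟩
    exact ⟨kw, List.mem_filter.mpr ⟨hkl, by simpa [List.isEmpty_iff] using hne⟩,
      (pv_mem_findAllA cs kw hne 0 m).mpr ⟨i, Nat.zero_le i, hp, hm⟩⟩

-- B's whole output is the canonical rendering of any run list matching the coverage predicate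
theorem pv_alt_eq (keywords : List String) (text : String) (M : List (Nat × Nat))
    (hpair : M.Pairwise (fun a b => a.2 < b.1))
    (hbd : ∀ x ∈ M, x.1 < x.2 ∧ x.2 ≤ text.toList.length)
    (hcov : ∀ p, p < text.toList.length →
      (pvCov text.toList (keywords.map String.toList) p ↔ ∃ x ∈ M, x.1 ≤ p ∧ p < x.2)) :
    highlight_overlapping_no_regex_alt keywords text =
      String.ofList (pvEmitRuns text.toList 0 M) := by
  unfold highlight_overlapping_no_regex_alt
  show String.ofList (PySem.Chars.join []
    (pvRenderB text.toList (pvCoverB text.toList (keywords.map String.toList)) 0)) = _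
  congr 1
  refine pvRenderB_eq text.toList _ 0 M hpair hbd (fun x _ => Nat.zero_le _) ?_
  intro p _ hp
  rw [pv_getD_iff, pv_getElem?_coverB text.toList _ p hp]
  exact hcov p hp

-- ===== VERDICT (by name: the statement is the Claim_ definition above) =====
theorem highlight_overlapping_no_regex_spec : Claim_equal_highlight_overlapping_no_regex := by
  intro keywords text _
  unfold Spec_highlight_overlapping_no_regex
  unfold highlight_overlapping_no_regex
  simp only []
  by_cases h0 : text.toList.isEmpty
  · rw [if_pos h0]
    have hnil : text.toList = [] := by simpa [List.isEmpty_iff] using h0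
    rw [pv_alt_eq keywords text [] (by simp) (by simp) (by simp [hnil])]
    rw [pvEmitRuns, hnil]
    rfl
  · rw [if_neg h0]
    by_cases h1 : ((keywords.map String.toList).filter (fun kw => !kw.isEmpty)).isEmpty
    · rw [if_pos h1]
      have hcov0 : ∀ p, ¬ pvCov text.toList (keywords.map String.toList) p := by
        rintro p ⟨kw, hkl, hne, _⟩
        have : kw ∈ (keywords.map String.toList).filter (fun kw => !kw.isEmpty) :=
          List.mem_filter.mpr ⟨hkl, by simpa [List.isEmpty_iff] using hne⟩
        rw [List.isEmpty_iff.mp h1] at this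
        simp at this
      rw [pv_alt_eq keywords text [] (by simp) (by simp)
        (fun p _ => by simp [hcov0 p])]
      rw [pvEmitRuns, List.drop_zero]
      exact String.ofList_toList.symm
    · rw [if_neg h1]
      by_cases h2 : ((keywords.map String.toList).filter (fun kw => !kw.isEmpty)).foldl
          (fun acc kw => acc ++ pvFindAllA text.toList kw 0) [] |>.isEmpty
      · rw [if_pos h2]
        have hcov0 : ∀ p, ¬ pvCov text.toList (keywords.map String.toList) p := by
          rintro p ⟨kw, hkl, hne, i, _, _, hp⟩
          have hm := (pv_mem_msA text.toList (keywords.map String.toList)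
            ((i : Int), (i : Int) + kw.length, kw)).mpr ⟨kw, hkl, hne, i, hp, rfl⟩
          rw [List.isEmpty_iff.mp h2] at hm
          simp at hm
        rw [pv_alt_eq keywords text [] (by simp) (by simp)
          (fun p _ => by simp [hcov0 p])]
        rw [pvEmitRuns, List.drop_zero]
        exact String.ofList_toList.symm
      · rw [if_neg h2]
        -- the main case
        set cs := text.toList with hcs
        set kwsL := keywords.map String.toList with hkwsL
        set ms := (kwsL.filter (fun kw => !kw.isEmpty)).foldl
          (fun acc kw => acc ++ pvFindAllA cs kw 0) [] with hms
        have hmsne : ms ≠ [] := by simpa [List.isEmpty_iff] using h2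
        set sm := PySem.List.sorted ms (fun m => m.1) false with hsm
        have hsmne : sm ≠ [] := by
          rw [hsm, Ne, PySem.List.sorted_eq_nil_iff]
          exact hmsne
        have hperm : ∀ m, m ∈ sm ↔ m ∈ ms := by
          intro m
          rw [hsm]
          exact PySem.List.mem_sorted ms (fun m => m.1) false m
        have hmemsm : ∀ m, m ∈ sm ↔ ∃ kw ∈ kwsL, kw ≠ [] ∧ ∃ i : Nat, kw <+: cs.drop i ∧
            m = ((i : Int), (i : Int) + kw.length, kw) := by
          intro m
          rw [hperm m]
          exact pv_mem_msA cs kwsL m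
        have helt : ∀ y ∈ sm, 0 ≤ y.1 ∧ y.1 < y.2.1 ∧ y.2.1 ≤ (cs.length : Int) := by
          intro y hy
          obtain ⟨kw, _, hne, i, hp, rfl⟩ := (hmemsm y).mp hy
          have h1 := pv_match_le cs kw i hne hp
          have h2 : 0 < kw.length := List.length_pos_iff.mpr hne
          refine ⟨by positivity, ?_, ?_⟩
          · show (i : Int) < (i : Int) + (kw.length : Int)
            omega
          · show (i : Int) + (kw.length : Int) ≤ (cs.length : Int)
            exact_mod_cast h1
        obtain ⟨hMne, hMpair, hMlt, hMf, hMcov⟩ := pvMergeInv sm hsmne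
          (PySem.List.sorted_pairwise ms (fun m => m.1))
          (fun y hy => (helt y hy).2.1)
        obtain ⟨h0', t0, hsmeq⟩ := List.exists_cons_of_ne_nil hsmne
        have hmerged : sm.tail.foldl pvMergeStepA [sm.head!] = pvMergeList sm := by
          rw [hsmeq]
          rfl
        rw [hmerged]
        set M := pvMergeList sm with hMdef
        -- element bounds for the merged list
        have hMbd : ∀ x ∈ M, 0 ≤ x.1 ∧ x.1 < x.2.1 ∧ x.2.1 ≤ (cs.length : Int) := by
          intro x hx
          obtain ⟨y, hy, hxy⟩ := hMf x hx
          have h1 := (helt y hy).1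
          have hlt := hMlt x hx
          have hend : x.2.1 ≤ (cs.length : Int) := by
            obtain ⟨z, hz, hz1, hz2⟩ := (hMcov (x.2.1 - 1)).mp ⟨x, hx, by omega, by omega⟩
            have := (helt z hz).2.2
            omega
          exact ⟨by omega, hlt, hend⟩
        -- A's output
        rw [pvEmitA cs M [] 0 le_rfl hMpair (fun x hx => ⟨(hMbd x hx).1, (hMbd x hx).2.1⟩)]
        rw [pv_join_flatten, List.flatten_nil, List.nil_append, Int.toNat_zero]
        -- B's output
        rw [pv_alt_eq keywords text (M.map fun x => (x.1.toNat, x.2.1.toNat)) ?pair ?bd ?cov]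
        case pair =>
          rw [List.pairwise_map]
          refine hMpair.imp_of_mem ?_
          intro a b ha hb hab
          have h1 := hMbd a ha
          have h2 := hMbd b hb
          omega
        case bd =>
          intro x hx
          rw [← hcs]
          obtain ⟨y, hy, rfl⟩ := List.mem_map.mp hx
          have h1 := hMbd y hy
          constructor <;> omega
        case cov =>
          intro p hp
          constructor
          · rintro ⟨kw, hkl, hne, s, h1, h2, h3⟩
            obtain ⟨x, hx, hx1, hx2⟩ := (hMcov (p : Int)).mpr
              ⟨((s : Int), (s : Int) + kw.length, kw), (hmemsm _).mpr ⟨kw, hkl, hne, s, h3, rfl⟩,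
                (by exact_mod_cast h1 : (s : Int) ≤ (p : Int)),
                (by exact_mod_cast h2 : (p : Int) < (s : Int) + (kw.length : Int))⟩
            refine ⟨(x.1.toNat, x.2.1.toNat), List.mem_map.mpr ⟨x, hx, rfl⟩, ?_, ?_⟩
            · have := (hMbd x hx).1
              omega
            · have := (hMbd x hx).1
              omega
          · rintro ⟨x, hx, hx1, hx2⟩
            obtain ⟨y, hy, rfl⟩ := List.mem_map.mp hx
            have hb := hMbd y hy
            obtain ⟨z, hz, hz1, hz2⟩ := (hMcov (p : Int)).mp ⟨y, hy, by omega, by omega⟩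
            obtain ⟨kw, hkl, hne, s, h3, rfl⟩ := (hmemsm z).mp hz
            have hz1' : (s : Int) ≤ (p : Int) := hz1
            have hz2' : (p : Int) < (s : Int) + (kw.length : Int) := hz2
            refine ⟨kw, hkl, hne, s, by exact_mod_cast hz1', by exact_mod_cast hz2', h3⟩
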